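-- pv_equiv track=rewrite | github.com/alejoriosm04/university-repository | 2-semester/Data-structure-and-algorithms-I/labs/seguimiento-2/seguimiento-2.4/toboganesyesc.py | dfs
-- ===== SOURCE A (Python) =====
-- def dfs(tablero, actual, N, pasos):
--     if actual >= N:
--         return 10000000000000
--     if actual == N - 1:
--         return pasos
--
--     mejor = None
--     for i in range(1, 7): # 1 ... 6
--         siguiente = actual + i
--         if siguiente < N and tablero[siguiente] != -1 and tablero[siguiente] >= siguiente:
--             valor_retorno = dfs(tablero, tablero[siguiente], N, pasos + 1)
--         else:
--             valor_retorno = dfs(tablero, siguiente, N, pasos + 1)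
--         mejor = valor_retorno if mejor == None else min(valor_retorno, mejor)
--     return mejor
-- ===== SOURCE B (Python) =====
-- def dfs(tablero, actual, N, pasos):
--     # Bottom-up DP: a table of min rolls per square, instead of A's 6-way DFS recursion.
--     BIG = 10000000000000
--     if actual >= N:
--         return BIG
--     if actual == N - 1:
--         return pasos
--     INF = 10 ** 18
--     M = [0] * N  # M[N-1] = 0; M[a] = min rolls from a to reach N-1 (>= INF: unreachable)
--     for a in range(N - 2, -1, -1):
--         best = INF
--         for i in range(1, 7):
--             s = a + i
--             if s < N and tablero[s] != -1 and tablero[s] >= s: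
--                 s = tablero[s]
--             v = M[s] if s < N else INF
--             if v < best:
--                 best = v
--         M[a] = best + 1
--     m = M[actual]
--     return pasos + m if m < INF else BIG
-- ===== Notes on version B (the rewrite author's own statement) =====
-- stated objective: alternative
-- what changed: Replaces the 6-way DFS recursion with a bottom-up dynamic-programming table of min-rolls-to-finish per square, filled once from N-2 down to 0; the pasos offset is added only at the end.
-- outside the precondition, e.g. on dfs([20, 20, 20, 20, 20, 20, 20, 20, 20], 0, 10, 0): A returns 10000000000000, B raises IndexError; on dfs([-1, -1], -1, 2, 0): A returns 1, B returns 0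
import Mathlib
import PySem

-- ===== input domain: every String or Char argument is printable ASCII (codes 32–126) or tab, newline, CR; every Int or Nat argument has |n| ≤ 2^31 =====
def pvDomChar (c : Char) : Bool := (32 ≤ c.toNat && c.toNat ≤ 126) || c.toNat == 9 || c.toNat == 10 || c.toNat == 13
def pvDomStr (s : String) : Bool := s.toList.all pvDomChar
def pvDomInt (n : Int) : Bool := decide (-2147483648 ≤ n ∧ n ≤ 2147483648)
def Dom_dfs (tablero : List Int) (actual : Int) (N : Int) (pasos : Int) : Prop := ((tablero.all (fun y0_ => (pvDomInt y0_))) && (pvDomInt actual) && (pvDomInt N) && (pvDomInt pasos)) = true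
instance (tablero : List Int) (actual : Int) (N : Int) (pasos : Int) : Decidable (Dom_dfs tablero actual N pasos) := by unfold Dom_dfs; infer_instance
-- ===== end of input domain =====

-- B replaces A's 6-way DFS recursion by a bottom-up dynamic-programming table of min rolls per square (objective: alternative).

-- ===== PORT A =====
-- fuel totalizes A's recursion; ((N - actual).toNat + 1) is always enough on Pre_ (each call strictly increases `actual`)
def dfsGo (tablero : List Int) (N : Int) : Nat → Int → Int → Int
  | 0, _, _ => 0
  | fuel+1, actual, pasos =>
    if actual ≥ N then 10000000000000
    else if actual = N - 1 then pasos
    else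
      let mejor := (PySem.List.pyRange 1 7 1).foldl (fun (mejor : Option Int) i =>
        let siguiente := actual + i
        let valor_retorno :=
          if siguiente < N ∧ PySem.List.pyGetD tablero siguiente 0 ≠ -1 ∧ PySem.List.pyGetD tablero siguiente 0 ≥ siguiente then
            dfsGo tablero N fuel (PySem.List.pyGetD tablero siguiente 0) (pasos + 1)
          else
            dfsGo tablero N fuel siguiente (pasos + 1)
        some (match mejor with | none => valor_retorno | some m => min valor_retorno m)) (none : Option Int)
      match mejor with | some m => m | none => 0

def dfs (tablero : List Int) (actual : Int) (N : Int) (pasos : Int) : Int :=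
  dfsGo tablero N ((N - actual).toNat + 1) actual pasos

-- ===== PORT B =====
def dfs_alt (tablero : List Int) (actual : Int) (N : Int) (pasos : Int) : Int :=
  if actual ≥ N then 10000000000000
  else if actual = N - 1 then pasos
  else
    let M0 : List Int := List.replicate N.toNat 0
    let M := (PySem.List.pyRange (N-2) (-1) (-1)).foldl (fun M a =>
      let best := (PySem.List.pyRange 1 7 1).foldl (fun best i =>
        let s := a + i
        let s := if s < N ∧ PySem.List.pyGetD tablero s 0 ≠ -1 ∧ PySem.List.pyGetD tablero s 0 ≥ s then PySem.List.pyGetD tablero s 0 else s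
        let v := if s < N then PySem.List.pyGetD M s 0 else 1000000000000000000
        if v < best then v else best) (1000000000000000000 : Int)
      PySem.List.pySetD M a (best + 1)) M0
    let m := PySem.List.pyGetD M actual 0
    if m < 1000000000000000000 then pasos + m else 10000000000000

-- ===== PRECONDITION & SPEC =====
-- Pre_ keeps the natural board domain: either the game is already decided (actual ≥ N-1), or the
-- position is a real square (0 ≤ actual) on a board of at least N squares.  It excludes boards
-- shorter than N (A usually raises IndexError there, though it can return when every reachable
-- landing square jumps off-board) and negative actual below N-1, where A's value comes from
-- Python's negative-index wraparound.
def Pre_dfs (tablero : List Int) (actual : Int) (N : Int) (pasos : Int) : Prop :=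
  N - 1 ≤ actual ∨ (0 ≤ actual ∧ N ≤ (tablero.length : Int))
instance (tablero : List Int) (actual : Int) (N : Int) (pasos : Int) : Decidable (Pre_dfs tablero actual N pasos) := by unfold Pre_dfs; infer_instance

def pvWitness_dfs : List Int × Int × Int × Int := ([2, -1, 5, -1, 0], 0, 5, 0)

def Spec_dfs (tablero : List Int) (actual : Int) (N : Int) (pasos : Int) (out : Int) : Prop := out = dfs_alt tablero actual N pasos
instance (tablero : List Int) (actual : Int) (N : Int) (pasos : Int) (out : Int) : Decidable (Spec_dfs tablero actual N pasos out) := by unfold Spec_dfs; infer_instance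

-- ===== CLAIM (what is proved, stated in full; the proofs are below) =====
def Claim_equal_dfs : Prop := ∀ (tablero : List Int) (actual : Int) (N : Int) (pasos : Int), Dom_dfs tablero actual N pasos → Pre_dfs tablero actual N pasos → Spec_dfs tablero actual N pasos (dfs tablero actual N pasos)

-- ===== LEMMAS AND PROOFS =====

-- destination of a die landing on square s (the snake/ladder rule both programs apply)
def pvDest (t : List Int) (N s : Int) : Int :=
  if s < N ∧ PySem.List.pyGetD t s 0 ≠ -1 ∧ PySem.List.pyGetD t s 0 ≥ s then PySem.List.pyGetD t s 0 else s

-- specification: min number of rolls from square a to land exactly on N-1 (≥ pvINF ⇔ unreachable)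
def pvINF : Int := 1000000000000000000
def pvBIG : Int := 10000000000000

def mstepF (t : List Int) (N : Int) : Nat → Int → Int
  | 0, _ => pvINF
  | fuel+1, a =>
    if a ≥ N then pvINF
    else if a = N - 1 then 0
    else 1 + (PySem.List.pyRange 1 7 1).foldl (fun b i =>
        min b (if pvDest t N (a + i) < N then mstepF t N fuel (pvDest t N (a + i)) else pvINF)) pvINF

def mstep (t : List Int) (N : Int) (a : Int) : Int := mstepF t N (N - a).toNat a

lemma pvDest_gt (t : List Int) (N s : Int) : s ≤ pvDest t N s := by
  unfold pvDest; split
  · next h => exact h.2.2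
  · exact le_refl s

lemma pyRange16 : PySem.List.pyRange 1 7 1 = [1,2,3,4,5,6] := by decide

lemma foldl_min_le_init (f : Int → Int) : ∀ (L : List Int) (b : Int),
    L.foldl (fun acc x => min acc (f x)) b ≤ b := by
  intro L
  induction L with
  | nil => intro b; simp
  | cons x L ih =>
    intro b
    calc (x :: L).foldl (fun acc x => min acc (f x)) b
        = L.foldl (fun acc x => min acc (f x)) (min b (f x)) := by simp [List.foldl]
      _ ≤ min b (f x) := ih _
      _ ≤ b := min_le_left _ _

lemma foldl_min_cases (f : Int → Int) : ∀ (L : List Int) (b : Int),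
    L.foldl (fun acc x => min acc (f x)) b = b ∨
    ∃ x ∈ L, L.foldl (fun acc x => min acc (f x)) b = f x := by
  intro L
  induction L with
  | nil => intro b; left; rfl
  | cons x L ih =>
    intro b
    have h := ih (min b (f x))
    rcases h with h | ⟨y, hy, h⟩
    · simp only [List.foldl] at *
      rcases le_total b (f x) with hle | hle
      · left; rw [h]; exact min_eq_left hle
      · right; exact ⟨x, by simp, by rw [h]; exact min_eq_right hle⟩
    · right; exact ⟨y, by simp [hy], by simpa [List.foldl] using h⟩

lemma mstepF_congr (t : List Int) (N : Int) : ∀ (f1 : Nat), ∀ (a : Int) (f2 : Nat),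
    (N - a).toNat ≤ f1 → (N - a).toNat ≤ f2 → 1 ≤ f1 → 1 ≤ f2 →
    mstepF t N f1 a = mstepF t N f2 a := by
  intro f1
  induction f1 with
  | zero => intro a f2 _ _ h1 _; omega
  | succ k ih =>
    intro a f2 hk hf2 _ hf2pos
    obtain ⟨l, rfl⟩ : ∃ l, f2 = l + 1 := ⟨f2 - 1, by omega⟩
    simp only [mstepF]
    by_cases hge : a ≥ N
    · simp [hge]
    · by_cases heq : a = N - 1
      · simp [hge, heq]
      · have ha2 : a ≤ N - 2 := by omega
        have hNa : 2 ≤ (N - a).toNat := by omega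
        simp only [hge, heq, if_false, if_neg]
        congr 1
        refine PySem.List.foldl_congr_mem' _ _ _ _ ?_
        intro i hi acc
        have hi' : 1 ≤ i ∧ i < 7 := (PySem.List.mem_pyRange_one.mp hi)
        have hd : a + i ≤ pvDest t N (a + i) := pvDest_gt t N (a + i)
        by_cases hlt : pvDest t N (a + i) < N
        · simp only [hlt, if_true]
          congr 1
          exact ih (pvDest t N (a + i)) l (by omega) (by omega) (by omega) (by omega)
        · simp [hlt]

lemma mstep_eq_mstepF (t : List Int) (N : Int) (a : Int) (fuel : Nat)
    (h1 : (N - a).toNat ≤ fuel) (h2 : 1 ≤ fuel) :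
    mstepF t N fuel a = mstep t N a := by
  unfold mstep
  by_cases hge : a ≥ N
  · have h0 : (N - a).toNat = 0 := by omega
    rw [h0]
    obtain ⟨l, rfl⟩ : ∃ l, fuel = l + 1 := ⟨fuel - 1, by omega⟩
    simp [mstepF, hge]
  · exact mstepF_congr t N fuel a (N - a).toNat h1 (le_refl _) h2 (by omega)

lemma mstep_le (t : List Int) (N : Int) : ∀ (fuel : Nat) (a : Int),
    (N - a).toNat ≤ fuel →
    mstepF t N fuel a < pvINF → mstepF t N fuel a ≤ N - 1 - a := by
  intro fuel
  induction fuel with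
  | zero => intro a _ hlt; simp [mstepF] at hlt
  | succ k ih =>
    intro a hk hlt
    by_cases hge : a ≥ N
    · simp [mstepF, hge] at hlt
    · by_cases heq : a = N - 1
      · simp [mstepF, heq]
      · have ha2 : a ≤ N - 2 := by omega
        simp only [mstepF, hge, heq, if_false] at hlt ⊢
        set f : Int → Int := fun i => (if pvDest t N (a + i) < N then mstepF t N k (pvDest t N (a + i)) else pvINF) with hf
        have hcase := foldl_min_cases f (PySem.List.pyRange 1 7 1) pvINF
        rcases hcase with hc | ⟨i, hi, hc⟩
        · rw [hc] at hlt; unfold pvINF at hlt; omega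
        · have hi' : 1 ≤ i ∧ i < 7 := (PySem.List.mem_pyRange_one.mp hi)
          have hd : a + i ≤ pvDest t N (a + i) := pvDest_gt t N (a + i)
          rw [hc] at hlt ⊢
          by_cases hdN : pvDest t N (a + i) < N
          · simp only [hf, hdN, if_true] at hlt ⊢
            have := ih (pvDest t N (a + i)) (by omega) (by omega)
            omega
          · simp only [hf, hdN, if_false] at hlt; omega

lemma optfold (p : Int) : ∀ (ms : List Int) (w : Int),
    w ≤ pvINF → (w < pvINF → p + w < pvBIG) → (∀ m ∈ ms, m < pvINF → p + m < pvBIG) →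
    ms.foldl (fun acc m => some (match acc with
        | none => if m < pvINF then p + m else pvBIG
        | some x => min (if m < pvINF then p + m else pvBIG) x)) (some (if w < pvINF then p + w else pvBIG))
      = some (if ms.foldl min w < pvINF then p + ms.foldl min w else pvBIG) := by
  intro ms
  induction ms with
  | nil => intro w _ _ _; rfl
  | cons m ms ih =>
    intro w hw hbw hbm
    have hbm0 : m < pvINF → p + m < pvBIG := hbm m (by simp)
    have key : min (if m < pvINF then p + m else pvBIG) (if w < pvINF then p + w else pvBIG)
        = if min w m < pvINF then p + min w m else pvBIG := by
      unfold pvINF pvBIG at *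
      rcases le_total w m with h | h
      · rw [min_eq_left h]; split_ifs <;> omega
      · rw [min_eq_right h]; split_ifs <;> omega
    simp only [List.foldl, key]
    refine ih (min w m) (by omega) ?_ (fun x hx => hbm x (by simp [hx]))
    rcases le_total w m with h | h
    · rw [min_eq_left h]; exact hbw
    · rw [min_eq_right h]; exact hbm0

lemma optfold_none (p : Int) : ∀ (ms : List Int), ms ≠ [] →
    (∀ m ∈ ms, m < pvINF → p + m < pvBIG) →
    ms.foldl (fun acc m => some (match acc with
        | none => if m < pvINF then p + m else pvBIG
        | some x => min (if m < pvINF then p + m else pvBIG) x)) none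
      = some (if ms.foldl min pvINF < pvINF then p + ms.foldl min pvINF else pvBIG) := by
  intro ms hne hbm
  obtain ⟨m, ms', rfl⟩ : ∃ m ms', ms = m :: ms' := by
    cases ms with | nil => exact absurd rfl hne | cons m ms' => exact ⟨m, ms', rfl⟩
  have hbm0 : m < pvINF → p + m < pvBIG := hbm m (by simp)
  have h1 : (if m < pvINF then p + m else pvBIG) = if min pvINF m < pvINF then p + min pvINF m else pvBIG := by
    unfold pvINF pvBIG at *
    rcases le_total (1000000000000000000 : Int) m with h | h
    · rw [min_eq_left h]; split_ifs <;> omega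
    · rw [min_eq_right h]
  have h2 : (m :: ms').foldl min pvINF = ms'.foldl min (min pvINF m) := rfl
  simp only [List.foldl, h2]
  rw [h1]
  refine optfold p ms' (min pvINF m) (min_le_left _ _) ?_ (fun x hx => hbm x (by simp [hx]))
  rcases le_total pvINF m with h | h
  · rw [min_eq_left h]; intro hc; omega
  · rw [min_eq_right h]; exact hbm0

lemma dfsGo_eq (t : List Int) (N : Int) : ∀ (fuel : Nat) (a p : Int),
    (N - 1 ≤ a ∨ (0 ≤ a ∧ N ≤ (t.length : Int))) →
    N - a ≤ 10000000000 → p + (N - a) ≤ 10000000000 →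
    (N - a).toNat < fuel →
    dfsGo t N fuel a p = (if mstep t N a < pvINF then p + mstep t N a else pvBIG) := by
  intro fuel
  induction fuel with
  | zero => intro a p _ _ _ h; omega
  | succ f ih =>
    intro a p hpre hb1 hb2 hfuel
    by_cases hge : a ≥ N
    · have h0 : (N - a).toNat = 0 := by omega
      have hm : mstep t N a = pvINF := by unfold mstep; rw [h0]; rfl
      simp [dfsGo, hge, hm, pvBIG]
    · by_cases heq : a = N - 1
      · subst heq
        have h1 : (N - (N - 1)).toNat = 1 := by omega
        have hm : mstep t N (N - 1) = 0 := by
          unfold mstep; rw [h1]; simp [mstepF, hge]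
        simp [dfsGo, hge, hm, pvINF]
      · -- recursive case
        have hlen : 0 ≤ a ∧ N ≤ (t.length : Int) := by
          rcases hpre with h | h
          · omega
          · exact h
        have ha2 : a ≤ N - 2 := by omega
        have hkge : 2 ≤ (N - a).toNat := by omega
        -- destination facts for each die value
        have hdge : ∀ i : Int, i ∈ PySem.List.pyRange 1 7 1 → a + 1 ≤ pvDest t N (a + i) := by
          intro i hi
          have hi' := PySem.List.mem_pyRange_one.mp hi
          have := pvDest_gt t N (a + i)
          omega
        set g : Int → Int := fun i => mstep t N (pvDest t N (a + i)) with hg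
        -- each mstep value, when finite, is small
        have hsmall : ∀ i : Int, i ∈ PySem.List.pyRange 1 7 1 → g i < pvINF → g i ≤ N - a - 2 := by
          intro i hi hfin
          have hd := hdge i hi
          have : mstepF t N (N - pvDest t N (a + i)).toNat (pvDest t N (a + i)) ≤ N - 1 - pvDest t N (a + i) :=
            mstep_le t N _ _ (le_refl _) hfin
          have h2 : mstep t N (pvDest t N (a + i)) ≤ N - 1 - pvDest t N (a + i) := this
          simp only [hg]
          omega
        -- A side: rewrite the loop body to the canonical form over g
        have hA : (PySem.List.pyRange 1 7 1).foldl (fun (mejor : Option Int) i =>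
              let siguiente := a + i
              let valor_retorno :=
                if siguiente < N ∧ PySem.List.pyGetD t siguiente 0 ≠ -1 ∧ PySem.List.pyGetD t siguiente 0 ≥ siguiente then
                  dfsGo t N f (PySem.List.pyGetD t siguiente 0) (p + 1)
                else
                  dfsGo t N f siguiente (p + 1)
              some (match mejor with | none => valor_retorno | some m => min valor_retorno m)) none
            = ((PySem.List.pyRange 1 7 1).map g).foldl (fun acc m => some (match acc with
                | none => if m < pvINF then (p + 1) + m else pvBIG
                | some x => min (if m < pvINF then (p + 1) + m else pvBIG) x)) none := by
          rw [List.foldl_map]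
          refine PySem.List.foldl_congr_mem' _ _ _ _ ?_
          intro i hi acc
          have hd := hdge i hi
          have hdest : (if a + i < N ∧ PySem.List.pyGetD t (a + i) 0 ≠ -1 ∧ PySem.List.pyGetD t (a + i) 0 ≥ a + i then
                  dfsGo t N f (PySem.List.pyGetD t (a + i) 0) (p + 1)
                else
                  dfsGo t N f (a + i) (p + 1)) = dfsGo t N f (pvDest t N (a + i)) (p + 1) := by
            unfold pvDest
            by_cases hc : a + i < N ∧ PySem.List.pyGetD t (a + i) 0 ≠ -1 ∧ PySem.List.pyGetD t (a + i) 0 ≥ a + i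
            · simp [hc]
            · simp [hc]
          have hrec : dfsGo t N f (pvDest t N (a + i)) (p + 1)
              = (if g i < pvINF then (p + 1) + g i else pvBIG) := by
            refine ih (pvDest t N (a + i)) (p + 1) (Or.inr ⟨by omega, hlen.2⟩) (by omega) (by omega) (by omega)
          simp only [hdest, hrec]
        -- B/spec side: the mstep recurrence in terms of g
        obtain ⟨k, hk⟩ : ∃ k, (N - a).toNat = k + 1 := ⟨(N - a).toNat - 1, by omega⟩
        have hS : mstep t N a = 1 + ((PySem.List.pyRange 1 7 1).map g).foldl min pvINF := by
          unfold mstep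
          rw [hk]
          simp only [mstepF, hge, heq, if_false]
          congr 1
          rw [List.foldl_map]
          refine PySem.List.foldl_congr_mem' _ _ _ _ ?_
          intro i hi acc
          have hd := hdge i hi
          congr 1
          by_cases hdN : pvDest t N (a + i) < N
          · simp only [hdN, if_true, hg]
            exact mstep_eq_mstepF t N _ k (by omega) (by omega)
          · simp only [hdN, if_false, hg]
            have h0 : (N - pvDest t N (a + i)).toNat = 0 := by omega
            unfold mstep; rw [h0]; rfl
        -- combine
        have hmem : ∀ m ∈ (PySem.List.pyRange 1 7 1).map g, m < pvINF → (p + 1) + m < pvBIG := by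
          intro m hm hfin
          obtain ⟨i, hi, rfl⟩ := List.mem_map.mp hm
          have := hsmall i hi hfin
          unfold pvBIG; omega
        have hW := optfold_none (p + 1) ((PySem.List.pyRange 1 7 1).map g) (by rw [pyRange16]; simp) hmem
        have hWle : ((PySem.List.pyRange 1 7 1).map g).foldl min pvINF ≤ pvINF := by
          have := foldl_min_le_init (fun x => x) ((PySem.List.pyRange 1 7 1).map g) pvINF
          simpa using this
        have hWsmall : ((PySem.List.pyRange 1 7 1).map g).foldl min pvINF < pvINF →
            ((PySem.List.pyRange 1 7 1).map g).foldl min pvINF ≤ N - a - 2 := by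
          intro hfin
          have hcase := foldl_min_cases (fun x => x) ((PySem.List.pyRange 1 7 1).map g) pvINF
          simp only [] at hcase
          rcases hcase with hc | ⟨x, hx, hc⟩
          · rw [hc] at hfin; omega
          · obtain ⟨i, hi, rfl⟩ := List.mem_map.mp hx
            rw [hc] at hfin ⊢
            exact hsmall i hi hfin
        simp only [dfsGo, hge, heq, if_false, hA, hW, hS]
        set W := ((PySem.List.pyRange 1 7 1).map g).foldl min pvINF with hWdef
        by_cases hfin : W < pvINF
        · have h1 : 1 + W < pvINF := by have := hWsmall hfin; unfold pvINF at *; omega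
          simp only [hfin, if_true, h1]
          ring
        · have hWeq : W = pvINF := le_antisymm hWle (by omega)
          have h1 : ¬ (1 + W < pvINF) := by omega
          simp [hfin, h1, pvBIG]

lemma table_eq (t : List Int) (N : Int) (hlen : N ≤ (t.length : Int)) : ∀ (k : Nat) (a0 : Int) (M : List Int),
    a0 = (k : Int) - 1 → a0 ≤ N - 2 → M.length = N.toNat →
    (∀ j, a0 < j → j < N → PySem.List.pyGetD M j 0 = mstep t N j) →
    (∀ j, 0 ≤ j → j < N →
      PySem.List.pyGetD ((PySem.List.pyRange a0 (-1) (-1)).foldl (fun M a =>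
        let best := (PySem.List.pyRange 1 7 1).foldl (fun best i =>
          let s := a + i
          let s := if s < N ∧ PySem.List.pyGetD t s 0 ≠ -1 ∧ PySem.List.pyGetD t s 0 ≥ s then PySem.List.pyGetD t s 0 else s
          let v := if s < N then PySem.List.pyGetD M s 0 else 1000000000000000000
          if v < best then v else best) (1000000000000000000 : Int)
        PySem.List.pySetD M a (best + 1)) M) j 0 = mstep t N j) := by
  intro k
  induction k with
  | zero =>
    intro a0 M ha0 _ _ hM j hj0 hjN
    have : a0 = -1 := by omega
    subst this
    rw [PySem.List.pyRange_neg_one_eq_nil (by omega)]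
    exact hM j (by omega) hjN
  | succ k ih =>
    intro a0 M ha0 ha2 hlenM hM j hj0 hjN
    have ha0n : 0 ≤ a0 := by omega
    rw [PySem.List.pyRange_neg_one_cons (by omega)]
    simp only [List.foldl]
    -- the updated table after processing square a0
    refine ih (a0 - 1) _ (by omega) (by omega) ?_ ?_ j hj0 hjN
    · rw [PySem.List.length_pySetD]
      exact hlenM
    · intro j' hj' hj'N
      have hj'n : 0 ≤ j' := by omega
      have hcast : ((a0.toNat : Nat) : Int) = a0 := Int.toNat_of_nonneg ha0n
      have hcastj : ((j'.toNat : Nat) : Int) = j' := Int.toNat_of_nonneg hj'n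
      rw [show a0 = ((a0.toNat : Nat) : Int) from hcast.symm]
      rw [show j' = ((j'.toNat : Nat) : Int) from hcastj.symm]
      rw [PySem.List.pyGetD_pySetD_natCast M a0.toNat j'.toNat _ _ (by omega)]
      rw [hcast, hcastj]
      by_cases hja : j'.toNat = a0.toNat
      · have hjeq : j' = a0 := by omega
        rw [if_pos hja, hjeq]
        -- the freshly written entry: best + 1 = mstep a0
        obtain ⟨k2, hk2⟩ : ∃ k2, (N - a0).toNat = k2 + 1 := ⟨(N - a0).toNat - 1, by omega⟩
        have hS : mstep t N a0 = 1 + (PySem.List.pyRange 1 7 1).foldl (fun b i =>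
            min b (if pvDest t N (a0 + i) < N then mstepF t N k2 (pvDest t N (a0 + i)) else pvINF)) pvINF := by
          unfold mstep
          rw [hk2]
          simp only [mstepF, if_neg (show ¬ a0 ≥ N by omega), if_neg (show ¬ a0 = N - 1 by omega)]
        rw [hS]
        have hbody : (PySem.List.pyRange 1 7 1).foldl (fun best i =>
              let s := a0 + i
              let s := if s < N ∧ PySem.List.pyGetD t s 0 ≠ -1 ∧ PySem.List.pyGetD t s 0 ≥ s then PySem.List.pyGetD t s 0 else s
              let v := if s < N then PySem.List.pyGetD M s 0 else 1000000000000000000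
              if v < best then v else best) (1000000000000000000 : Int)
            = (PySem.List.pyRange 1 7 1).foldl (fun b i =>
              min b (if pvDest t N (a0 + i) < N then mstepF t N k2 (pvDest t N (a0 + i)) else pvINF)) pvINF := by
          refine PySem.List.foldl_congr_mem' _ _ _ _ ?_
          intro i hi acc
          have hi' := PySem.List.mem_pyRange_one.mp hi
          have hd : a0 + i ≤ pvDest t N (a0 + i) := pvDest_gt t N (a0 + i)
          have hsd : (if a0 + i < N ∧ PySem.List.pyGetD t (a0 + i) 0 ≠ -1 ∧ PySem.List.pyGetD t (a0 + i) 0 ≥ a0 + i then PySem.List.pyGetD t (a0 + i) 0 else a0 + i) = pvDest t N (a0 + i) := by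
            unfold pvDest; rfl
          simp only [hsd]
          have hmin : ∀ (v b : Int), (if v < b then v else b) = min b v := by
            intro v b
            rcases le_or_gt b v with h | h
            · rw [if_neg (by omega), min_eq_left h]
            · rw [if_pos h, min_eq_right (by omega)]
          rw [hmin]
          congr 1
          by_cases hdN : pvDest t N (a0 + i) < N
          · simp only [hdN, if_true]
            have hup : PySem.List.pyGetD M (pvDest t N (a0 + i)) 0 = mstep t N (pvDest t N (a0 + i)) :=
              hM _ (by omega) hdN
            rw [hup]
            exact (mstep_eq_mstepF t N _ k2 (by omega) (by omega)).symm
          · simp only [hdN, if_false]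
            rfl
        rw [hbody]
        omega
      · rw [if_neg hja]
        exact hM j' (by omega) hj'N

-- ===== VERDICT (by name: the statement is the Claim_ definition above) =====
theorem dfs_spec : Claim_equal_dfs := by
  intro t a N p hdom hpre
  unfold Spec_dfs
  simp only [Dom_dfs, List.all_eq_true, Bool.and_eq_true, pvDomInt, decide_eq_true_eq] at hdom
  obtain ⟨⟨⟨-, hba⟩, hbN⟩, hbp⟩ := hdom
  unfold dfs dfs_alt
  by_cases hge : a ≥ N
  · simp [dfsGo, hge]
  · by_cases heq : a = N - 1
    · simp [dfsGo, hge, heq]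
    · have hlen : 0 ≤ a ∧ N ≤ (t.length : Int) := by
        rcases hpre with h | h
        · exact absurd h (by omega)
        · exact h
      rcases hlen with ⟨ha0, hNlen⟩
      have hA := dfsGo_eq t N ((N - a).toNat + 1) a p hpre (by omega) (by omega) (by omega)
      rw [hA]
      simp only [if_neg hge, if_neg heq]
      have hinit : ∀ j, N - 2 < j → j < N → PySem.List.pyGetD (List.replicate N.toNat 0) j 0 = mstep t N j := by
        intro j hj1 hj2
        have hjeq : j = N - 1 := by omega
        subst hjeq
        have h1 : PySem.List.pyGetD (List.replicate N.toNat (0 : Int)) (N - 1) 0 = (0 : Int) := by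
          rw [PySem.List.pyGetD_eq_getElem (List.replicate N.toNat (0 : Int)) 0 (by omega) (by simp)]
          simp
        rw [h1]
        have h2 : (N - (N - 1)).toNat = 1 := by omega
        unfold mstep
        rw [h2]
        simp [mstepF, show ¬ N - 1 ≥ N by omega]
      have htab := table_eq t N hNlen (N - 1).toNat (N - 2) (List.replicate N.toNat 0)
        (by omega) (by omega) (by simp) hinit a ha0 (by omega)
      rw [htab]
      rfl
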